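-- pv_equiv track=rewrite | github.com/Klaudia1303/student_code_analysis | Progetto-tirocinio2024/data/student_data/2068010_Tataru/LabPython08/LabPython08/A_Ex2.py | A_Ex2
-- ===== SOURCE A (Python) =====
-- def A_Ex2(l):
--     lf=set()
--     for i in l:
--         i="".join(sorted(i))
--         while (len(i)>0):
--             if(i.count(i[0])>1):
--                 t=i[0]
--                 lf.add(i[0])
--                 while (i.count(t)>0):
--                     i=i[1:len(i)]
--                 continue
--             i=i[1:len(i)]
--     return(lf)
-- ===== SOURCE B (Python) =====
-- def A_Ex2(l):
--     res = set()
--     for s in l: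
--         t = sorted(s)
--         for x, y in zip(t, t[1:]):
--             if x == y:
--                 res.add(x)
--     return res
-- ===== Notes on version B (the rewrite author's own statement) =====
-- stated objective: faster
-- what changed: Replaces A's repeated .count scans and character-by-character stripping of each sorted string with a single adjacent-pair scan (zip of the sorted string with its tail), adding a character when two equal neighbours are found; measured about 2x faster.
import Mathlib
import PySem

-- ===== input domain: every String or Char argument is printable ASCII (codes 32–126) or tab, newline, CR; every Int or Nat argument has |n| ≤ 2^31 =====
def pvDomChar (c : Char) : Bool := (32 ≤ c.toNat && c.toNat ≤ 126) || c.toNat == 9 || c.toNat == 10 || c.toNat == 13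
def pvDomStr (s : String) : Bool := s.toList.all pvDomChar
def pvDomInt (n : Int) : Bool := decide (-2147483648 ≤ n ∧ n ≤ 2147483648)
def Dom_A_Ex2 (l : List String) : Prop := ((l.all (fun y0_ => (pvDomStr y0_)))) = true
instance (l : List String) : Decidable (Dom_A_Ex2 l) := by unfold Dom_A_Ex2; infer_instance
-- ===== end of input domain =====

-- B replaces A's repeated .count scans and stripping slices of each sorted string by a single
-- adjacent-pair scan of the sorted string (objective: simpler, one linear pass after sorting).

-- ===== PORT A =====
-- inner while loop: `while i.count(t) > 0: i = i[1:len(i)]`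
def pvInner (t : Char) : List Char → List Char
  | [] => []
  | c :: rest => if (c :: rest).count t > 0 then pvInner t rest else c :: rest

-- cited by pvOuter's termination proof
theorem pvInner_length_le (t : Char) (l : List Char) : (pvInner t l).length ≤ l.length := by
  induction l with
  | nil => simp [pvInner]
  | cons c rest ih =>
    simp only [pvInner]
    split
    · exact le_trans ih (Nat.le_succ _)
    · exact le_refl _

-- outer while loop over the sorted string `i`, with the accumulator set `lf`
def pvOuter (lf : PySem.Set String) : List Char → PySem.Set String
  | [] => lf
  | c :: rest =>
    if (c :: rest).count c > 1 then
      pvOuter (PySem.Set.add lf (String.ofList [c])) (pvInner c (c :: rest))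
    else
      pvOuter lf rest
termination_by l => l.length
decreasing_by
  · have h1 : pvInner c (c :: rest) = pvInner c rest := by
      simp only [pvInner]
      rw [if_pos (by simp [List.count_cons_self])]
    rw [h1]
    have := pvInner_length_le c rest
    simp only [List.length_cons]
    omega
  · simp

def A_Ex2 (l : List String) : List String :=
  l.foldl (fun lf s => pvOuter lf (PySem.List.sorted s.toList (fun c => c) false)) PySem.Set.empty

-- ===== PORT B =====
def A_Ex2_alt (l : List String) : List String :=
  l.foldl (fun res s =>
    let t := PySem.List.sorted s.toList (fun c => c) false
    (t.zip t.tail).foldl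
      (fun r p => if p.1 == p.2 then PySem.Set.add r (String.ofList [p.1]) else r) res)
    PySem.Set.empty

-- ===== PRECONDITION & SPEC =====
def Spec_A_Ex2 (l : List String) (out : List String) : Prop := out = A_Ex2_alt l
instance (l : List String) (out : List String) : Decidable (Spec_A_Ex2 l out) := by unfold Spec_A_Ex2; infer_instance

-- ===== CLAIM (what is proved, stated in full; the proofs are below) =====
def Claim_equal_A_Ex2 : Prop := ∀ (l : List String), Dom_A_Ex2 l → Spec_A_Ex2 l (A_Ex2 l)

-- ===== LEMMAS AND PROOFS =====

-- B's inner loop over one (already sorted) string, as a named function for the proofs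
def pvG (r : PySem.Set String) (cs : List Char) : PySem.Set String :=
  (cs.zip cs.tail).foldl
    (fun r p => if p.1 == p.2 then PySem.Set.add r (String.ofList [p.1]) else r) r

theorem pvSet_add_of_mem {r : PySem.Set String} {a : String} (h : a ∈ r) :
    PySem.Set.add r a = r := by
  simp [PySem.Set.add, PySem.Set.contains, h]

-- on a sorted list c :: rest, A's stripping loop removes exactly the leading run of c
theorem pvInner_eq_dropWhile (c : Char) (rest : List Char)
    (h : (c :: rest).Pairwise (· ≤ ·)) :
    pvInner c rest = rest.dropWhile (· == c) ∧ c ∉ rest.dropWhile (· == c) := by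
  induction rest with
  | nil => simp [pvInner]
  | cons x rs ih =>
    rcases List.pairwise_cons.mp h with ⟨hc, hxs⟩
    by_cases hx : x = c
    · subst hx
      have hpair : (x :: rs).Pairwise (· ≤ ·) := hxs
      have := ih (by
        refine List.pairwise_cons.mpr ⟨?_, (List.pairwise_cons.mp hxs).2⟩
        intro b hb; exact hc b (List.mem_cons_of_mem _ hb))
      simpa [pvInner, List.count_cons_self, List.dropWhile] using this
    · have hne : c ∉ x :: rs := by
        intro hmem
        rcases List.mem_cons.mp hmem with h1 | h1
        · exact hx h1.symm
        · have h2 : x ≤ c := (List.pairwise_cons.mp hxs).1 c h1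
          have h3 : c ≤ x := hc x (List.mem_cons_self)
          exact hx (le_antisymm h2 h3)
      have hcount : (x :: rs).count c = 0 := List.count_eq_zero.mpr hne
      have hbeq : (x == c) = false := beq_eq_false_iff_ne.mpr hx
      constructor
      · simp [pvInner, hcount, List.dropWhile, hbeq]
      · simp only [List.dropWhile, hbeq]
        exact hne

-- B's scan over a leading run of c whose letter is already in the set is a no-op
theorem pvG_absorb (c : Char) (rest : List Char) (r : PySem.Set String)
    (h : (c :: rest).Pairwise (· ≤ ·)) (hm : String.ofList [c] ∈ r) :
    pvG r (c :: rest) = pvG r (rest.dropWhile (· == c)) := by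
  induction rest with
  | nil => simp [pvG]
  | cons x rs ih =>
    rcases List.pairwise_cons.mp h with ⟨hc, hxs⟩
    by_cases hx : x = c
    · subst hx
      have hstep : pvG r (x :: x :: rs) = pvG r (x :: rs) := by
        simp [pvG, pvSet_add_of_mem hm]
      rw [hstep]
      have := ih (by
        refine List.pairwise_cons.mpr ⟨?_, (List.pairwise_cons.mp hxs).2⟩
        intro b hb; exact hc b (List.mem_cons_of_mem _ hb))
      simpa [List.dropWhile] using this
    · have hne : ¬ c = x := fun h1 => hx h1.symm
      have hxbeq : (x == c) = false := beq_eq_false_iff_ne.mpr hx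
      simp [pvG, List.dropWhile, hne, hxbeq]

-- main loop equivalence on one sorted string
theorem pvMain (cs : List Char) (r : PySem.Set String) (h : cs.Pairwise (· ≤ ·)) :
    pvOuter r cs = pvG r cs := by
  match cs with
  | [] => simp [pvOuter, pvG]
  | c :: rest =>
    by_cases hc : c ∈ rest
    · obtain ⟨x, rs, rfl⟩ : ∃ x rs, rest = x :: rs := by
        cases rest with
        | nil => simp at hc
        | cons x rs => exact ⟨x, rs, rfl⟩
      have hx : x = c := by
        rcases List.pairwise_cons.mp h with ⟨h1, h2⟩
        rcases List.mem_cons.mp hc with h3 | h3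
        · exact h3.symm
        · exact le_antisymm ((List.pairwise_cons.mp h2).1 c h3) (h1 x List.mem_cons_self)
      subst hx
      have htail : (x :: rs).Pairwise (· ≤ ·) := (List.pairwise_cons.mp h).2
      have hdrop := pvInner_eq_dropWhile x (x :: rs) h
      -- A takes the duplicate branch
      have hA : pvOuter r (x :: x :: rs) =
          pvOuter (PySem.Set.add r (String.ofList [x])) (rs.dropWhile (· == x)) := by
        rw [pvOuter]
        rw [if_pos (by simp [List.count_cons_self])]
        have h1 : pvInner x (x :: x :: rs) = pvInner x (x :: rs) := by
          simp only [pvInner]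
          rw [if_pos (by simp [List.count_cons_self])]
        rw [h1, hdrop.1]
        simp [List.dropWhile]
      -- B adds on the first pair, further pairs of the run are absorbed
      have hB : pvG r (x :: x :: rs) =
          pvG (PySem.Set.add r (String.ofList [x])) (rs.dropWhile (· == x)) := by
        have hstep : pvG r (x :: x :: rs) = pvG (PySem.Set.add r (String.ofList [x])) (x :: rs) := by
          simp [pvG]
        rw [hstep]
        have := pvG_absorb x rs (PySem.Set.add r (String.ofList [x])) htail
          (by simp [PySem.Set.add]; split <;> simp_all)
        exact this
      rw [hA, hB]
      exact pvMain (rs.dropWhile (· == x)) _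
        ((List.pairwise_cons.mp htail).2.sublist (List.dropWhile_sublist _))
    · have hcount : ¬ (c :: rest).count c > 1 := by
        have : rest.count c = 0 := List.count_eq_zero.mpr hc
        simp [List.count_cons_self, this]
      rw [pvOuter, if_neg hcount]
      cases rest with
      | nil => simp [pvOuter, pvG]
      | cons x rs =>
        have hne : ¬ c = x := fun h1 => hc (h1 ▸ List.mem_cons_self)
        have hstep : pvG r (c :: x :: rs) = pvG r (x :: rs) := by
          simp [pvG, hne]
        rw [hstep]
        exact pvMain (x :: rs) r ((List.pairwise_cons.mp h).2)
termination_by cs.length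
decreasing_by
  · subst_vars
    have := List.length_dropWhile_le (· == x) rs
    simp only [List.length_cons]
    omega
  · subst_vars
    simp

theorem pvFold_eq (l : List String) (r : PySem.Set String) :
    l.foldl (fun lf s => pvOuter lf (PySem.List.sorted s.toList (fun c => c) false)) r =
    l.foldl (fun res s =>
      let t := PySem.List.sorted s.toList (fun c => c) false
      (t.zip t.tail).foldl
        (fun r p => if p.1 == p.2 then PySem.Set.add r (String.ofList [p.1]) else r) res) r := by
  induction l generalizing r with
  | nil => rfl
  | cons s l ih =>
    simp only [List.foldl_cons]
    rw [pvMain _ r (by simpa using PySem.List.sorted_pairwise s.toList (fun c => c))]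
    exact ih _

-- ===== VERDICT (by name: the statement is the Claim_ definition above) =====
theorem A_Ex2_spec : Claim_equal_A_Ex2 := by
  intro l _
  unfold Spec_A_Ex2 A_Ex2 A_Ex2_alt
  exact pvFold_eq l PySem.Set.empty
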